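-- pv_equiv track=rewrite | github.com/liskos/matveev2025 | proba.py | func
-- ===== SOURCE A (Python) =====
-- def func(x):
--     a = 0
--     b = 1
--     while x > 0:
--         a = a + 1
--         if x % 12 != 0:
--             b = b * (x % 12)
--         x = x // 12
--     return a, b
-- ===== SOURCE B (Python) =====
-- def _prod12(x):
--     # product of nonzero base-12 digits, by recursion on the number
--     if x <= 0:
--         return 1
--     d = x % 12
--     return (d if d else 1) * _prod12(x // 12)
--
-- def func(x):
--     # digit count by exponential search over powers of 12 (no digit extraction)
--     a = 0
--     p = 1
--     while p <= x:
--         p = p * 12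
--         a = a + 1
--     return a, _prod12(x)
-- ===== Notes on version B (the rewrite author's own statement) =====
-- stated objective: alternative
-- what changed: B computes the digit count by a separate exponential search over growing powers of 12 (comparing p <= x, never extracting digits) and computes the nonzero-digit product by an independent recursion on the number, instead of A's single fused while-loop maintaining both accumulators over extracted digits.
import Mathlib
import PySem

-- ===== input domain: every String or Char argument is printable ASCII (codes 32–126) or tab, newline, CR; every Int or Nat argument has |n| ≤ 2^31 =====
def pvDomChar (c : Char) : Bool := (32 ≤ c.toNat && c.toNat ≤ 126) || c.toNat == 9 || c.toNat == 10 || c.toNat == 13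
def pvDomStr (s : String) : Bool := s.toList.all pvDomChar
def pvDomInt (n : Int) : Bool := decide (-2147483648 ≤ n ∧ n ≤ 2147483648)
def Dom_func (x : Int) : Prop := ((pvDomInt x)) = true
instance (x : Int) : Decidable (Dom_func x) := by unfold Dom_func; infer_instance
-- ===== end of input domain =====

-- B derives the digit count by an exponential search over powers of 12 and the
-- nonzero-digit product by an independent recursion, instead of A's fused loop.

-- ===== PORT A =====
-- A's while-loop over the state (x, a, b)
def funcLoop (x a b : Int) : Int × Int :=
  if _h : x > 0 then
    funcLoop (PySem.Int.floordiv x 12) (a + 1)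
      (if PySem.Int.mod x 12 ≠ 0 then b * PySem.Int.mod x 12 else b)
  else (a, b)
termination_by x.toNat
decreasing_by
  rw [PySem.Int.floordiv_eq_ediv_of_pos (by omega : (0:Int) < 12)]; omega

def func (x : Int) : Int × Int := funcLoop x 0 1

-- ===== PORT B =====
-- _prod12: product of nonzero base-12 digits, recursion on the number
def prod12 (x : Int) : Int :=
  if _h : x ≤ 0 then 1
  else
    (if PySem.Int.mod x 12 ≠ 0 then PySem.Int.mod x 12 else 1) *
      prod12 (PySem.Int.floordiv x 12)
termination_by x.toNat
decreasing_by
  rw [PySem.Int.floordiv_eq_ediv_of_pos (by omega : (0:Int) < 12)]; omega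

-- the 'while p <= x: p *= 12; a += 1' exponential search (hp keeps p positive)
def countLoop (x p a : Int) (hp : 0 < p) : Int :=
  if _h : p ≤ x then countLoop x (p * 12) (a + 1) (by omega) else a
termination_by (x + 1 - p).toNat
decreasing_by omega

def func_alt (x : Int) : Int × Int := (countLoop x 1 0 (by omega), prod12 x)

-- ===== PRECONDITION & SPEC =====
def Spec_func (x : Int) (out : Int × Int) : Prop := out = func_alt x
instance (x : Int) (out : Int × Int) : Decidable (Spec_func x out) := by unfold Spec_func; infer_instance

-- ===== CLAIM (what is proved, stated in full; the proofs are below) =====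
def Claim_equal_func : Prop := ∀ (x : Int), Dom_func x → Spec_func x (func x)

-- ===== LEMMAS AND PROOFS =====
-- proof-side common characterization: the base-12 digit list of x (least significant first)
def digitsB (x : Int) : List Int :=
  if _h : x > 0 then PySem.Int.mod x 12 :: digitsB (PySem.Int.floordiv x 12) else []
termination_by x.toNat
decreasing_by
  rw [PySem.Int.floordiv_eq_ediv_of_pos (by omega : (0:Int) < 12)]; omega

theorem funcLoop_eq (x a b : Int) :
    funcLoop x a b = (a + ((digitsB x).length : Int), b * ((digitsB x).filter (fun d => d ≠ 0)).prod) := by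
  fun_induction funcLoop x a b with
  | case1 x a b h ih =>
    rw [digitsB, dif_pos h]
    by_cases hd : (12:Int) ∣ x <;>
      simp [hd, List.filter] at ih ⊢ <;> rw [ih] <;>
      refine Prod.ext ?_ ?_ <;> simp <;> ring
  | case2 x a b h =>
    rw [digitsB, dif_neg h]
    simp

theorem prod12_eq (x : Int) :
    prod12 x = ((digitsB x).filter (fun d => d ≠ 0)).prod := by
  fun_induction prod12 x with
  | case1 x h => rw [digitsB, dif_neg (by omega)]; simp
  | case2 x h ih =>
    rw [digitsB, dif_pos (by omega)]
    by_cases hd : (12:Int) ∣ x <;>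
      simp [hd, List.filter] at ih ⊢ <;> simp [ih]

theorem countLoop_eq (x p a : Int) (hp : 0 < p) :
    countLoop x p a hp = a + ((digitsB (x / p)).length : Int) := by
  fun_induction countLoop x p a hp with
  | case1 p a hp h ih =>
    have hpos : (1:Int) ≤ x / p := (Int.le_ediv_iff_mul_le hp).mpr (by omega)
    rw [ih]
    conv_rhs => rw [digitsB, dif_pos (by omega : x / p > 0)]
    rw [PySem.Int.floordiv_eq_ediv_of_pos (by omega : (0:Int) < 12),
        Int.ediv_ediv_of_nonneg (by omega : (0:Int) ≤ p)]
    simp; ring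
  | case2 p a hp h =>
    have : x / p < 1 := (Int.ediv_lt_iff_lt_mul hp).mpr (by omega)
    rw [digitsB, dif_neg (by omega)]
    simp

-- ===== VERDICT (by name: the statement is the Claim_ definition above) =====
theorem func_spec : Claim_equal_func := by
  intro x _
  unfold Spec_func func func_alt
  rw [funcLoop_eq, prod12_eq, countLoop_eq]
  simp
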